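-- pv_equiv track=rewrite | github.com/cassieangel/phazed-bot-tournament | phasetype.py | same_colour
-- ===== SOURCE A (Python) =====
-- def same_colour(group):
--     '''
--     check if the cards in the group has the same colour (ACE is a wild card)
--     '''
--     if len(group) > 1:
--         # change each card's suit into colour
--         group_by_colour = []
--         for card in group:
--             value = card[0]
--             suit = card[1]
--             if suit == "S" or suit == "C":
--                 suit = "BLACK"
--             if suit == "H" or suit == "D":
--                 suit = "RED"
--             group_by_colour += [(value, suit), ]
--         # find first colour that is not a wild card
--         firstcolour = group_by_colour[0][1]
--         for card in group_by_colour: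
--             value = card[0]
--             colour = card[1]
--             if value != "A":
--                 firstcolour = colour
--                 break
--         # checking if group is the same colour
--         samecolour = True
--         for card in group_by_colour:
--             value = card[0]
--             colour = card[1]
--             if colour != firstcolour:
--                 if value != "A":
--                     samecolour = False
--         return samecolour
-- ===== SOURCE B (Python) =====
-- def same_colour(group):
--     '''
--     check if the cards in the group has the same colour (ACE is a wild card)
--     '''
--     if len(group) <= 1:
--         return None
--     colours = set()
--     for value, suit in group:
--         if value != "A":
--             if suit in ("S", "C"):
--                 colour = "BLACK"
--             elif suit in ("H", "D"):
--                 colour = "RED"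
--             else:
--                 colour = suit
--             colours.add(colour)
--     return len(colours) <= 1
-- ===== Notes on version B (the rewrite author's own statement) =====
-- stated objective: simpler
-- what changed: Replaced A's three passes (build a colour list, scan for the first non-ace colour, scan again comparing every non-ace card to it) with one pass that collects the distinct non-ace colours in a set and returns whether there is at most one.
import Mathlib
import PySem

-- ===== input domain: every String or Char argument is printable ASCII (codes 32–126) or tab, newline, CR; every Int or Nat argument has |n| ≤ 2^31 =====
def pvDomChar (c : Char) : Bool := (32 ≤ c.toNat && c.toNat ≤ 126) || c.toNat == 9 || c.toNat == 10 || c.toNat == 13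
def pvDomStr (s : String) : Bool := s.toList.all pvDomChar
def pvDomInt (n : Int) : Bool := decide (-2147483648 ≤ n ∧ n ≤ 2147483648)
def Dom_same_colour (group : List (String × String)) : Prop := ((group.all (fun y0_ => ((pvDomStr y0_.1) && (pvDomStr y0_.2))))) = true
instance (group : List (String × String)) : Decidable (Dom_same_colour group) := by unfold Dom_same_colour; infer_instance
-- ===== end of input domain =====

-- B replaces A's three passes (colour list, first non-ace colour, mismatch scan) with one pass over a set of distinct non-ace colours; objective: simpler.


-- ===== PORT A =====
-- Port of A: three passes — build the colour list, find the first non-ace colour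
-- (the break-loop ported as List.find?), then scan for mismatches.
def same_colour (group : List (String × String)) : Option Bool :=
  if group.length > 1 then
    let group_by_colour := group.foldl (fun acc card =>
      let value := card.1
      let suit := card.2
      let suit := if suit = "S" ∨ suit = "C" then "BLACK" else suit
      let suit := if suit = "H" ∨ suit = "D" then "RED" else suit
      acc ++ [(value, suit)]) []
    -- group_by_colour[0][1]: in range since len(group) > 1
    let firstcolour := (PySem.List.pyGetD group_by_colour 0 ("", "")).2
    let firstcolour :=
      match group_by_colour.find? (fun card => card.1 ≠ "A") with
      | some card => card.2
      | none => firstcolour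
    let samecolour := group_by_colour.foldl (fun samecolour card =>
      if card.2 ≠ firstcolour then
        if card.1 ≠ "A" then false else samecolour
      else samecolour) true
    some samecolour
  else
    none

-- ===== PORT B =====
-- Port of B: one pass collecting the distinct non-ace colours in a set.
def same_colour_alt (group : List (String × String)) : Option Bool :=
  if group.length ≤ 1 then
    none
  else
    let colours := group.foldl (fun colours card =>
      if card.1 ≠ "A" then
        PySem.Set.add colours
          (if card.2 = "S" ∨ card.2 = "C" then "BLACK"
           else if card.2 = "H" ∨ card.2 = "D" then "RED"
           else card.2)
      else colours) PySem.Set.empty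
    some (decide (PySem.Set.len colours ≤ 1))

-- ===== PRECONDITION & SPEC =====
def Spec_same_colour (group : List (String × String)) (out : Option Bool) : Prop := out = same_colour_alt group
instance (group : List (String × String)) (out : Option Bool) : Decidable (Spec_same_colour group out) := by unfold Spec_same_colour; infer_instance

-- ===== CLAIM (what is proved, stated in full; the proofs are below) =====
def Claim_equal_same_colour : Prop := ∀ (group : List (String × String)), Dom_same_colour group → Spec_same_colour group (same_colour group)

-- ===== LEMMAS AND PROOFS =====

-- Helper notions used only by the proofs below.

-- the colour a suit is mapped to (both ports perform this mapping)
def pvCol (s : String) : String :=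
  if s = "S" ∨ s = "C" then "BLACK" else if s = "H" ∨ s = "D" then "RED" else s

-- the list of colours of the non-ace cards, in order
def pvNonAce (group : List (String × String)) : List String :=
  (group.filter (fun c => c.1 ≠ "A")).map (fun c => pvCol c.2)

-- A's two sequential reassignments of `suit` compute pvCol
lemma pvColA_eq (s : String) :
    (if (if s = "S" ∨ s = "C" then "BLACK" else s) = "H" ∨
        (if s = "S" ∨ s = "C" then "BLACK" else s) = "D" then "RED"
     else (if s = "S" ∨ s = "C" then "BLACK" else s)) = pvCol s := by
  unfold pvCol
  by_cases h1 : s = "S" ∨ s = "C" <;> simp [h1]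

-- A's first loop builds the mapped list
lemma pvFoldA (group : List (String × String)) (acc : List (String × String)) :
    group.foldl (fun acc card =>
      let value := card.1
      let suit := card.2
      let suit := if suit = "S" ∨ suit = "C" then "BLACK" else suit
      let suit := if suit = "H" ∨ suit = "D" then "RED" else suit
      acc ++ [(value, suit)]) acc
    = acc ++ group.map (fun c => (c.1, pvCol c.2)) := by
  induction group generalizing acc with
  | nil => simp
  | cons c t ih => simp [List.foldl_cons, ih, pvColA_eq c.2]

-- B's loop folds Set.add over the non-ace colours
lemma pvFoldB (group : List (String × String)) (s : PySem.Set String) :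
    group.foldl (fun colours card =>
      if card.1 ≠ "A" then
        PySem.Set.add colours
          (if card.2 = "S" ∨ card.2 = "C" then "BLACK"
           else if card.2 = "H" ∨ card.2 = "D" then "RED"
           else card.2)
      else colours) s
    = (pvNonAce group).foldl PySem.Set.add s := by
  induction group generalizing s with
  | nil => simp [pvNonAce]
  | cons c t ih =>
    rw [List.foldl_cons]
    by_cases h : c.1 = "A"
    · have hna : pvNonAce (c :: t) = pvNonAce t := by
        unfold pvNonAce; rw [List.filter_cons_of_neg (by simp [h])]
      rw [hna, if_neg (by simp [h]), ih]
    · have hna : pvNonAce (c :: t) = pvCol c.2 :: pvNonAce t := by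
        unfold pvNonAce; rw [List.filter_cons_of_pos (by simp [h])]; rfl
      rw [hna, if_pos (by simp [h]), ih, List.foldl_cons]
      rfl

-- A's third loop is an `all` over the mapped list
lemma pvFoldC (l : List (String × String)) (f : String) (b : Bool) :
    l.foldl (fun samecolour card =>
      if card.2 ≠ f then
        if card.1 ≠ "A" then false else samecolour
      else samecolour) b
    = (b && l.all (fun c => c.1 == "A" || c.2 == f)) := by
  induction l generalizing b with
  | nil => simp
  | cons c t ih =>
    rw [List.foldl_cons, ih]
    by_cases h2 : c.2 = f <;> by_cases h1 : c.1 = "A" <;> simp [h1, h2]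

-- a set built from l has at most one element iff all elements of l coincide
lemma pvLenLeOne (l : List String) :
    PySem.Set.len (PySem.Set.ofList l) ≤ 1 ↔ ∀ a ∈ l, ∀ b ∈ l, a = b := by
  have hnd := PySem.Set.nodup_ofList (xs := l)
  constructor
  · intro h a ha b hb
    have ha' := (PySem.Set.mem_ofList l a).mpr ha
    have hb' := (PySem.Set.mem_ofList l b).mpr hb
    have hlen : (PySem.Set.ofList l).length ≤ 1 := by
      simpa [PySem.Set.len] using h
    cases hsl : PySem.Set.ofList l with
    | nil => rw [hsl] at ha'; simp at ha'
    | cons x t =>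
      cases t with
      | nil => rw [hsl] at ha' hb'; simp at ha' hb'; rw [ha', hb']
      | cons y r => rw [hsl] at hlen; simp at hlen
  · intro h
    cases hsl : PySem.Set.ofList l with
    | nil => simp [PySem.Set.len, hsl]
    | cons x t =>
      cases t with
      | nil => simp [PySem.Set.len, hsl]
      | cons y r =>
        exfalso
        have hx : x ∈ l := (PySem.Set.mem_ofList l x).mp (by rw [hsl]; simp)
        have hy : y ∈ l := (PySem.Set.mem_ofList l y).mp (by rw [hsl]; simp)
        rw [hsl] at hnd
        exact (List.nodup_cons.mp hnd).1 (by simp [h x hx y hy])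

-- the `all` over A's mapped list is an `all` over the non-ace colour list
lemma pvAllNonAce (group : List (String × String)) (f : String) :
    ((group.map (fun c => (c.1, pvCol c.2))).all (fun c => c.1 == "A" || c.2 == f))
    = (pvNonAce group).all (fun x => x == f) := by
  induction group with
  | nil => rfl
  | cons c t ih =>
    rw [List.map_cons, List.all_cons, ih]
    by_cases h : c.1 = "A"
    · simp [pvNonAce, h]
    · have hb : (c.1 == "A") = false := beq_eq_false_iff_ne.mpr h
      simp [pvNonAce, h, hb]

-- main equivalence, one input at a time
lemma pvMain (group : List (String × String)) :
    same_colour group = same_colour_alt group := by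
  unfold same_colour same_colour_alt
  by_cases hlen : group.length ≤ 1
  · have h1 : ¬ group.length > 1 := by omega
    simp [h1, hlen]
  · have hgt : group.length > 1 := by omega
    rw [if_pos hgt, if_neg hlen]
    simp only [pvFoldA, pvFoldB, List.nil_append, pvFoldC, Bool.true_and]
    rw [List.find?_map]
    simp only [Function.comp_def]
    cases hf : List.find? (fun x => decide (x.1 ≠ "A")) group with
    | none =>
      have hall : ∀ c ∈ group, c.1 = "A" := by
        intro c hc
        have := List.find?_eq_none.mp hf c hc
        simpa using this
      have hnon : pvNonAce group = [] := by
        simp only [pvNonAce, List.map_eq_nil_iff, List.filter_eq_nil_iff]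
        intro c hc; simp [hall c hc]
      simp only [hnon, Option.map_none]
      simp [PySem.Set.len, List.all_eq_true]
      intro a b hab
      exact Or.inl (hall (a, b) hab)
    | some c0 =>
      simp only [Option.map_some]
      rw [pvAllNonAce group (pvCol c0.2)]
      have hhd : (group.filter (fun x => decide (x.1 ≠ "A"))).head? = some c0 := by
        rw [List.head?_filter, hf]
      cases hfil : group.filter (fun x => decide (x.1 ≠ "A")) with
      | nil => rw [hfil] at hhd; simp at hhd
      | cons d rest =>
        rw [hfil] at hhd
        simp only [List.head?_cons, Option.some_inj] at hhd
        subst hhd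
        have hnon : pvNonAce group = pvCol d.2 :: rest.map (fun c => pvCol c.2) := by
          unfold pvNonAce; rw [hfil]; rfl
        rw [hnon, show (PySem.Set.empty : PySem.Set String) = [] from rfl,
           ← PySem.Set.ofList_eq_foldl]
        congr 1
        rw [Bool.eq_iff_iff]
        simp only [List.all_eq_true, decide_eq_true_eq, beq_iff_eq]
        rw [pvLenLeOne]
        constructor
        · intro h a ha b hb
          rw [h a ha, h b hb]
        · intro h x hx
          exact h x hx _ List.mem_cons_self

-- ===== VERDICT (by name: the statement is the Claim_ definition above) =====
theorem same_colour_spec : Claim_equal_same_colour := by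
  intro group _
  unfold Spec_same_colour
  exact pvMain group
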